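-- pv_equiv track=rewrite | github.com/ymtz13/CompetitiveProgramming | AtCoder/ARC180/Ctest.py | solve
-- ===== SOURCE A (Python) =====
-- def solve(A):
--     N = len(A)
--     S = set()
--     for b in range(1 << N):
--         B = A[:]
--         s = 0
--         for i, a in enumerate(A):
--             if (b >> i) & 1:
--                 s += a
--                 B[i] = s
--         S.add(tuple(B))
--
--     return S
-- ===== SOURCE B (Python) =====
-- def solve(A):
--     # Forward DP over positions: frontier of (prefix_tuple, running_sum) states,
--     # deduplicated at each step (insertion-ordered via dict keys), instead of
--     # recomputing each of the 2^N masks independently.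
--     states = {((), 0): None}
--     for a in A:
--         new_states = {}
--         for t, s in states:
--             new_states[(t + (a,), s)] = None
--         for t, s in states:
--             new_states[(t + (s + a,), s + a)] = None
--         states = new_states
--     return set(t for t, s in states)
-- ===== Notes on version B (the rewrite author's own statement) =====
-- stated objective: alternative
-- what changed: Replaces per-bitmask recomputation (rebuild the whole transformed tuple for each of the 2^N masks) by a left-to-right DP over positions that maintains a deduplicated frontier of (prefix, running_sum) states, expanding each state into its unselected/selected successors.
import Mathlib
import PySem

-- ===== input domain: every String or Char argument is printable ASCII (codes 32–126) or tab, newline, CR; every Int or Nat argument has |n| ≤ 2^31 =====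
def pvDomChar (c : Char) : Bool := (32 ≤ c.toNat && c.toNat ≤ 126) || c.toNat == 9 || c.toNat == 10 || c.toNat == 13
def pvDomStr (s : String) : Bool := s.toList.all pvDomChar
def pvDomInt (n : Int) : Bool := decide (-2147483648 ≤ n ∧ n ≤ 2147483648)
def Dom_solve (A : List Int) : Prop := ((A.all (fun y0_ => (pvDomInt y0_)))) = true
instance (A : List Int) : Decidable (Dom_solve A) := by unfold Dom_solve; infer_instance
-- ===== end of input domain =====

-- B changes the algorithm: a left-to-right DP over positions with a deduplicated frontier of
-- (prefix, running_sum) states, instead of rebuilding the tuple for each of the 2^N bitmasks.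
-- Equivalence of the RETURN value (a set, held in first-insertion order) is proved for all inputs.

-- ===== PORT A =====
-- inner loop body: 'if (b >> i) & 1: s += a; B[i] = s'
def innerStep (b : Int) (p : List Int × Int) (ia : Int × Int) : List Int × Int :=
  if PySem.Int.band (b >>> ia.1.toNat) 1 = 1 then
    (PySem.List.pySetD p.1 ia.1 (p.2 + ia.2), p.2 + ia.2)
  else p

def solve (A : List Int) : List (List Int) :=
  let N := A.length
  (PySem.List.pyRange 0 ((1 : Int) <<< N) 1).foldl
    (fun S b => PySem.Set.add S ((PySem.List.enumerate A 0).foldl (innerStep b) (A, 0)).1)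
    PySem.Set.empty

-- ===== PORT B =====
-- Source B keeps its frontier as insertion-ordered dict KEYS (values all None) and returns a set
-- built in insertion order; PySem.Set (distinct elements in first-insertion order) models both
-- exactly: dict-key insertion = Set.add, the final set(...) = the fold of Set.add below.
def solve_alt (A : List Int) : List (List Int) :=
  let states := A.foldl
    (fun (st : PySem.Set (List Int × Int)) a =>
      let ns := st.foldl (fun ns p => PySem.Set.add ns (p.1 ++ [a], p.2)) PySem.Set.empty
      st.foldl (fun ns p => PySem.Set.add ns (p.1 ++ [p.2 + a], p.2 + a)) ns)
    (PySem.Set.ofList [(([] : List Int), (0 : Int))])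
  states.foldl (fun r p => PySem.Set.add r p.1) PySem.Set.empty

-- ===== PRECONDITION & SPEC =====
def Spec_solve (A : List Int) (out : List (List Int)) : Prop := out = solve_alt A
instance (A : List Int) (out : List (List Int)) : Decidable (Spec_solve A out) := by unfold Spec_solve; infer_instance

-- ===== CLAIM (what is proved, stated in full; the proofs are below) =====
def Claim_equal_solve : Prop := ∀ (A : List Int), Dom_solve A → Spec_solve A (solve A)

-- ===== LEMMAS AND PROOFS =====

-- full per-mask pair (transformed tuple, final running sum) computed by A's inner loop
def fullPair (A : List Int) (b : Int) : List Int × Int :=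
  (PySem.List.enumerate A 0).foldl (innerStep b) (A, 0)

-- raw (duplicate-carrying) list of all (tuple, sum) states, masks in increasing order
def raw (A : List Int) : List (List Int × Int) :=
  A.foldl
    (fun L a => L.map (fun p => (p.1 ++ [a], p.2)) ++ L.map (fun p => (p.1 ++ [p.2 + a], p.2 + a)))
    [(([] : List Int), (0 : Int))]

-- SATURATION: folding Set.add over the image of an already-deduplicated list equals folding
-- over the image of the raw list.
theorem update_map_update {α β : Type} [BEq α] [LawfulBEq α] [BEq β] [LawfulBEq β]
    (f : α → β) (L : List α) : ∀ (s : PySem.Set α) (init : PySem.Set β),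
    PySem.Set.update init ((PySem.Set.update s L).map f)
      = PySem.Set.update (PySem.Set.update init (s.map f)) (L.map f) := by
  induction L with
  | nil => intro s init; simp [PySem.Set.update]
  | cons x L ih =>
    intro s init
    rw [PySem.Set.update_cons, ih]
    by_cases hx : x ∈ s
    · rw [PySem.Set.add_of_mem hx, List.map_cons, PySem.Set.update_cons,
        PySem.Set.add_of_mem ((PySem.Set.mem_update _ _ _).mpr (Or.inr (List.mem_map_of_mem hx)))]
    · rw [PySem.Set.add_of_not_mem hx, List.map_append, PySem.Set.update_append,
        List.map_cons, PySem.Set.update_cons]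
      rfl

theorem update_map_ofList {α β : Type} [BEq α] [LawfulBEq α] [BEq β] [LawfulBEq β]
    (f : α → β) (L : List α) (init : PySem.Set β) :
    PySem.Set.update init ((PySem.Set.ofList L).map f)
      = PySem.Set.update init (L.map f) := by
  have h := update_map_update f L (PySem.Set.empty) init
  simpa [PySem.Set.update_empty, PySem.Set.ofList, PySem.Set.update, PySem.Set.empty] using h

-- B's frontier fold, with the saturation lemma, is the dedup of the raw list
theorem states_eq_raw (A : List Int) :
    A.foldl
      (fun (st : PySem.Set (List Int × Int)) a =>
        let ns := st.foldl (fun ns p => PySem.Set.add ns (p.1 ++ [a], p.2)) PySem.Set.empty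
        st.foldl (fun ns p => PySem.Set.add ns (p.1 ++ [p.2 + a], p.2 + a)) ns)
      (PySem.Set.ofList [(([] : List Int), (0 : Int))])
      = PySem.Set.ofList (raw A) := by
  unfold raw
  generalize [(([] : List Int), (0 : Int))] = L
  induction A generalizing L with
  | nil => rfl
  | cons a A ih =>
    rw [List.foldl_cons, List.foldl_cons]
    have hns : (PySem.Set.ofList L).foldl
        (fun ns p => PySem.Set.add ns (p.1 ++ [a], p.2)) PySem.Set.empty
        = PySem.Set.ofList (L.map (fun p => (p.1 ++ [a], p.2))) := by
      rw [← PySem.Set.update_map_eq_foldl_add, update_map_ofList, PySem.Set.update_empty]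
    have hstep : (PySem.Set.ofList L).foldl
        (fun ns p => PySem.Set.add ns (p.1 ++ [p.2 + a], p.2 + a))
        ((PySem.Set.ofList L).foldl
          (fun ns p => PySem.Set.add ns (p.1 ++ [a], p.2)) PySem.Set.empty)
        = PySem.Set.ofList (L.map (fun p => (p.1 ++ [a], p.2))
            ++ L.map (fun p => (p.1 ++ [p.2 + a], p.2 + a))) := by
      rw [hns, ← PySem.Set.update_map_eq_foldl_add, update_map_ofList,
        PySem.Set.ofList_append]
    show List.foldl _ ((PySem.Set.ofList L).foldl
        (fun ns p => PySem.Set.add ns (p.1 ++ [p.2 + a], p.2 + a))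
        ((PySem.Set.ofList L).foldl
          (fun ns p => PySem.Set.add ns (p.1 ++ [a], p.2)) PySem.Set.empty)) _ = _
    rw [hstep]
    exact ih _

theorem innerStep_bit0 (b : Int) (p : List Int × Int) (ia : Int × Int)
    (h : ¬ PySem.Int.band (b >>> ia.1.toNat) 1 = 1) : innerStep b p ia = p := by
  unfold innerStep; rw [if_neg h]

theorem innerStep_bit1 (b : Int) (p : List Int × Int) (ia : Int × Int)
    (h : PySem.Int.band (b >>> ia.1.toNat) 1 = 1) :
    innerStep b p ia = (PySem.List.pySetD p.1 ia.1 (p.2 + ia.2), p.2 + ia.2) := by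
  unfold innerStep; rw [if_pos h]

theorem innerFold_length (b : Int) (xs : List (Int × Int)) : ∀ (B : List Int) (s : Int),
    ((xs.foldl (innerStep b) (B, s)).1).length = B.length := by
  induction xs with
  | nil => intro B s; rfl
  | cons q xs ih =>
    intro B s
    rw [List.foldl_cons]
    by_cases hc : PySem.Int.band (b >>> q.1.toNat) 1 = 1
    · rw [innerStep_bit1 b (B, s) q hc, ih]
      exact PySem.List.length_pySetD _ _ _
    · rw [innerStep_bit0 b (B, s) q hc]
      exact ih B s

theorem pySetD_append_left (B C : List Int) (i : Int) (v : Int)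
    (h0 : 0 ≤ i) (h1 : i < (B.length : Int)) :
    PySem.List.pySetD (B ++ C) i v = PySem.List.pySetD B i v ++ C := by
  rw [PySem.List.pySetD_of_nonneg _ _ h0, PySem.List.pySetD_of_nonneg _ _ h0,
    List.set_append, if_pos (by omega)]

theorem innerFold_append (b : Int) (xs : List (Int × Int)) : ∀ (B C : List Int) (s : Int),
    (∀ q ∈ xs, 0 ≤ q.1 ∧ q.1 < (B.length : Int)) →
    xs.foldl (innerStep b) (B ++ C, s)
      = ((xs.foldl (innerStep b) (B, s)).1 ++ C, (xs.foldl (innerStep b) (B, s)).2) := by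
  induction xs with
  | nil => intro B C s _; rfl
  | cons q xs ih =>
    intro B C s h
    have hq := h q List.mem_cons_self
    rw [List.foldl_cons, List.foldl_cons]
    by_cases hc : PySem.Int.band (b >>> q.1.toNat) 1 = 1
    · rw [innerStep_bit1 b (B ++ C, s) q hc, innerStep_bit1 b (B, s) q hc]
      rw [show ((B ++ C, s).1 : List Int) = B ++ C from rfl,
        pySetD_append_left B C q.1 (s + q.2) hq.1 hq.2]
      exact ih _ C _ (fun q' hq' => by
        rw [PySem.List.length_pySetD]; exact h q' (List.mem_cons_of_mem _ hq'))
    · rw [innerStep_bit0 b (B ++ C, s) q hc, innerStep_bit0 b (B, s) q hc]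
      exact ih B C s (fun q' hq' => h q' (List.mem_cons_of_mem _ hq'))

theorem innerFold_congr (b b' : Int) (xs : List (Int × Int))
    (h : ∀ q ∈ xs, PySem.Int.band (b >>> q.1.toNat) 1 = PySem.Int.band (b' >>> q.1.toNat) 1) :
    ∀ p, xs.foldl (innerStep b) p = xs.foldl (innerStep b') p := by
  induction xs with
  | nil => intro p; rfl
  | cons q xs ih =>
    intro p
    rw [List.foldl_cons, List.foldl_cons]
    have hstep : innerStep b p q = innerStep b' p q := by
      unfold innerStep; rw [h q List.mem_cons_self]
    rw [hstep]
    exact ih (fun q' hq' => h q' (List.mem_cons_of_mem _ hq')) _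

theorem band_shift_natCast (m i : Nat) :
    PySem.Int.band ((m : Int) >>> i) 1 = ((m / 2 ^ i) % 2 : Nat) := by
  rw [← Int.natCast_shiftRight]
  rw [show (1 : Int) = ((1 : Nat) : Int) from rfl, PySem.Int.band_natCast]
  rw [Nat.and_one_is_mod, Nat.shiftRight_eq_div_pow]

theorem bit_low (m i N : Nat) (hi : i < N) :
    PySem.Int.band (((m + 2 ^ N : Nat) : Int) >>> i) 1
      = PySem.Int.band ((m : Int) >>> i) 1 := by
  rw [band_shift_natCast, band_shift_natCast]
  congr 1
  have h2 : 2 ^ N = 2 ^ (N - i) * 2 ^ i := by rw [← pow_add]; congr 1; omega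
  rw [h2, Nat.add_mul_div_right _ _ (Nat.pow_pos (by omega))]
  have he : 2 ^ (N - i) % 2 = 0 := by
    have hni : N - i = (N - i - 1) + 1 := by omega
    rw [hni, pow_succ, Nat.mul_mod_left]
  omega

theorem bit_top_zero (m N : Nat) (h : m < 2 ^ N) :
    PySem.Int.band ((m : Int) >>> N) 1 = 0 := by
  rw [band_shift_natCast, Nat.div_eq_of_lt h]
  rfl

theorem bit_top_one (m N : Nat) (h : m < 2 ^ N) :
    PySem.Int.band (((m + 2 ^ N : Nat) : Int) >>> N) 1 = 1 := by
  rw [band_shift_natCast, Nat.add_div_right _ (Nat.pow_pos (by omega)),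
    Nat.div_eq_of_lt h]
  rfl

theorem enum_bounds (P : List Int) :
    ∀ q ∈ PySem.List.enumerate P 0, 0 ≤ q.1 ∧ q.1 < (P.length : Int) := by
  intro q hq
  rw [PySem.List.mem_enumerate_iff] at hq
  obtain ⟨k, hk, hp⟩ := hq
  subst hp
  constructor
  · simp
  · simp; omega

theorem fullPair_append_low (P : List Int) (a : Int) (m : Nat) (hm : m < 2 ^ P.length) :
    fullPair (P ++ [a]) (m : Int) = ((fullPair P m).1 ++ [a], (fullPair P m).2) := by
  unfold fullPair
  rw [PySem.List.enumerate_append, List.foldl_append,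
    innerFold_append (m : Int) _ P [a] 0 (enum_bounds P)]
  simp only [PySem.List.enumerate_cons, PySem.List.enumerate_nil, List.foldl_cons,
    List.foldl_nil, zero_add]
  rw [innerStep_bit0 _ _ _ (by
    rw [show (((P.length : Int), a) : Int × Int).1.toNat = P.length by simp,
      bit_top_zero m _ hm]
    decide)]

theorem fullPair_append_high (P : List Int) (a : Int) (m : Nat) (hm : m < 2 ^ P.length) :
    fullPair (P ++ [a]) ((m + 2 ^ P.length : Nat) : Int)
      = ((fullPair P m).1 ++ [(fullPair P m).2 + a], (fullPair P m).2 + a) := by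
  unfold fullPair
  rw [PySem.List.enumerate_append, List.foldl_append]
  rw [innerFold_congr _ (m : Int) (PySem.List.enumerate P 0) (fun q hq => by
    rw [PySem.List.mem_enumerate_iff] at hq
    obtain ⟨k, hk, hp⟩ := hq
    subst hp
    rw [show (((0 : Int) + (k : Nat), P[k]) : Int × Int).1.toNat = k by simp]
    exact bit_low m k P.length hk) (P ++ [a], 0)]
  rw [innerFold_append (m : Int) _ P [a] 0 (enum_bounds P)]
  simp only [PySem.List.enumerate_cons, PySem.List.enumerate_nil, List.foldl_cons,
    List.foldl_nil, zero_add]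
  rw [innerStep_bit1 _ _ _ (by
    rw [show (((P.length : Int), a) : Int × Int).1.toNat = P.length by simp,
      bit_top_one m _ hm])]
  have hlen : ((PySem.List.enumerate P 0).foldl (innerStep (m : Int)) (P, 0)).1.length
      = P.length := innerFold_length _ _ P 0
  show (PySem.List.pySetD _ ((P.length : Nat) : Int) _, _) = _
  rw [PySem.List.pySetD_natCast, List.set_append, if_neg (by omega),
    show P.length - ((PySem.List.enumerate P 0).foldl (innerStep (m : Int)) (P, 0)).1.length
      = 0 by omega]
  rfl

theorem shiftLeft_one_cast (k : Nat) : (1 : Int) <<< k = ((2 ^ k : Nat) : Int) := by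
  rw [Int.shiftLeft_eq]; push_cast; ring

theorem raw_append_singleton (P : List Int) (a : Int) :
    raw (P ++ [a]) = (raw P).map (fun p => (p.1 ++ [a], p.2))
      ++ (raw P).map (fun p => (p.1 ++ [p.2 + a], p.2 + a)) := by
  unfold raw
  rw [List.foldl_append]
  rfl

theorem pyRange_two_pow (k : Nat) :
    PySem.List.pyRange 0 ((1 : Int) <<< k) 1
      = (List.range (2 ^ k)).map (fun n : Nat => (n : Int)) := by
  rw [shiftLeft_one_cast, PySem.List.pyRange_one, sub_zero, Int.toNat_natCast]
  apply List.map_congr_left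
  intro n _
  exact zero_add _

-- A's inner loop on (P ++ [a]) splits: the P-part acts inside the prefix, then one last step
theorem raw_eq_map_fullPair (A : List Int) :
    raw A = (PySem.List.pyRange 0 ((1 : Int) <<< A.length) 1).map (fullPair A) := by
  induction A using List.reverseRecOn with
  | nil => decide
  | append_singleton P a ih =>
    rw [raw_append_singleton, ih, pyRange_two_pow, pyRange_two_pow,
      List.length_append,
      show ([a] : List Int).length = 1 from rfl,
      show 2 ^ (P.length + 1) = 2 ^ P.length + 2 ^ P.length by rw [pow_succ]; ring,
      List.range_add]
    simp only [List.map_append, List.map_map]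
    congr 1
    · apply List.map_congr_left
      intro k hk
      rw [List.mem_range] at hk
      exact (fullPair_append_low P a k hk).symm
    · apply List.map_congr_left
      intro k hk
      rw [List.mem_range] at hk
      show (fun p => (p.1 ++ [p.2 + a], p.2 + a)) (fullPair P (k : Int))
        = fullPair (P ++ [a]) ((2 ^ P.length + k : Nat) : Int)
      rw [Nat.add_comm (2 ^ P.length) k]
      exact (fullPair_append_high P a k hk).symm

-- ===== VERDICT (by name: the statement is the Claim_ definition above) =====
theorem solve_spec : Claim_equal_solve := by
  intro A _
  show solve A = solve_alt A
  unfold solve solve_alt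
  rw [states_eq_raw]
  show _ = List.foldl (fun r p => PySem.Set.add r p.1) PySem.Set.empty
      (PySem.Set.ofList (raw A))
  rw [← PySem.Set.update_map_eq_foldl_add, ← PySem.Set.update_map_eq_foldl_add,
    update_map_ofList, PySem.Set.update_empty, PySem.Set.update_empty]
  rw [raw_eq_map_fullPair, List.map_map]
  rfl
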